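-- pv_equiv track=rewrite | github.com/auberamas/pychatbot-wantou-ramassamy-int3 | functions_new.py | turn_text_in_lowercase
-- ===== SOURCE A (Python) =====
-- def turn_text_in_lowercase(file_list: list):
--     lowercase_file_list = []
--     for line in file_list:
--         for char in line:
--             if char.isupper():
--                 line = line.replace(char, chr(ord(char) + 32))
--         lowercase_file_list.append(line)
--     return lowercase_file_list
-- ===== SOURCE B (Python) =====
-- def turn_text_in_lowercase(file_list: list):
--     result = []
--     for line in file_list:
--         table = {ord(c): ord(c) + 32 for c in line if c.isupper()}
--         result.append(line.translate(table))
--     return result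
-- ===== Notes on version B (the rewrite author's own statement) =====
-- stated objective: alternative
-- what changed: Replaces A's repeated whole-line str.replace scan per uppercase character with one prebuilt ord->ord+32 translation table and a single str.translate pass per line.
import Mathlib
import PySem

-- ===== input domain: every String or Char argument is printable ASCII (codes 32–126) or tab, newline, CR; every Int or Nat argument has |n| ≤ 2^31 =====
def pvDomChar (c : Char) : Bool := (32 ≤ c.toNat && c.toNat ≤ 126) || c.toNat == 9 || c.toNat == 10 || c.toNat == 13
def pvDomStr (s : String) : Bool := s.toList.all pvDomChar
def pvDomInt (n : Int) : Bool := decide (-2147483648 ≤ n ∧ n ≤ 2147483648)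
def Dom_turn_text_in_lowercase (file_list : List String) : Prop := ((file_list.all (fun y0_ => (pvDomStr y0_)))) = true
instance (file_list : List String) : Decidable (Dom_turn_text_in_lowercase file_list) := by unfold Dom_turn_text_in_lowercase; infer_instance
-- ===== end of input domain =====

-- B builds an ord→ord+32 translation table per line and lowercases in one translate pass,
-- instead of A's repeated whole-line str.replace per uppercase character (alternative algorithm).


-- ===== PORT A =====
-- for each line: for char in line: if char.isupper(): line = line.replace(char, chr(ord(char)+32))
def turn_text_in_lowercase (file_list : List String) : List String :=
  file_list.foldl
    (fun lowercase_file_list line =>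
      lowercase_file_list ++
        [String.mk (line.toList.foldl
          (fun cur ch =>
            if PySem.Chars.isupper ch then
              PySem.Chars.replace cur [ch] [Char.ofNat (ch.toNat + 32)]
            else cur)
          line.toList)])
    []

-- ===== PORT B =====
-- {ord(c): ord(c) + 32 for c in line if c.isupper()}
def pvTable (cs : List Char) : PySem.Dict Int Int :=
  (cs.filter PySem.Chars.isupper).foldl
    (fun d c => d.insert ((c.toNat : Int)) ((c.toNat : Int) + 32)) PySem.Dict.empty

-- line.translate(table): each char is looked up by its ordinal; hits map to chr(value), misses stay
def pvTranslate (cs : List Char) (t : PySem.Dict Int Int) : List Char :=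
  cs.map (fun c =>
    match t.get? ((c.toNat : Int)) with
    | some v => Char.ofNat v.toNat
    | none => c)

def turn_text_in_lowercase_alt (file_list : List String) : List String :=
  file_list.map (fun line => String.mk (pvTranslate line.toList (pvTable line.toList)))

-- ===== PRECONDITION & SPEC =====
def Spec_turn_text_in_lowercase (file_list : List String) (out : List String) : Prop := out = turn_text_in_lowercase_alt file_list
instance (file_list : List String) (out : List String) : Decidable (Spec_turn_text_in_lowercase file_list out) := by unfold Spec_turn_text_in_lowercase; infer_instance

-- ===== CLAIM (what is proved, stated in full; the proofs are below) =====
def Claim_equal_turn_text_in_lowercase : Prop := ∀ (file_list : List String), Dom_turn_text_in_lowercase file_list → Spec_turn_text_in_lowercase file_list (turn_text_in_lowercase file_list)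

-- ===== LEMMAS AND PROOFS =====

-- the common per-character lowering both sides compute
def pvLow (c : Char) : Char :=
  if PySem.Chars.isupper c then Char.ofNat (c.toNat + 32) else c

-- lowering restricted to characters occurring in `rest`
def pvF (rest : List Char) (x : Char) : Char :=
  if PySem.Chars.isupper x = true ∧ x ∈ rest then Char.ofNat (x.toNat + 32) else x

lemma pv_go_singleton (c d : Char) (l : List Char) : ∀ (fuel : Nat) (acc : List Char), l.length ≤ fuel →
    PySem.Chars.replace.go [c] [d] fuel l acc
      = acc.reverse ++ l.map (fun x => if x = c then d else x) := by
  induction l with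
  | nil => intro fuel acc _; cases fuel <;> simp [PySem.Chars.replace.go]
  | cons x t ih =>
    intro fuel acc hf
    cases fuel with
    | zero => simp at hf
    | succ n =>
      have hunf : PySem.Chars.replace.go [c] [d] (n + 1) (x :: t) acc
          = if [c].isPrefixOf (x :: t) = true
              then PySem.Chars.replace.go [c] [d] n ((x :: t).drop 1) ([d].reverse ++ acc)
              else PySem.Chars.replace.go [c] [d] n t (x :: acc) := rfl
      rw [hunf]
      by_cases hx : x = c
      · subst hx
        simp only [List.isPrefixOf, Bool.and_true, beq_self_eq_true,
          if_pos, List.drop_succ_cons, List.drop_zero, List.reverse_singleton]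
        rw [List.singleton_append, ih n (d :: acc) (by simpa using Nat.le_of_succ_le_succ hf)]
        simp
      · have hpre : [c].isPrefixOf (x :: t) = false := by
          simp [List.isPrefixOf]
          exact fun h => (hx h.symm).elim
        rw [hpre]
        simp only [if_neg (by simp : ¬ (false = true))]
        rw [ih n (x :: acc) (by simpa using Nat.le_of_succ_le_succ hf)]
        simp [hx]

lemma pv_replace_singleton (s : List Char) (c d : Char) :
    PySem.Chars.replace s [c] [d] = s.map (fun x => if x = c then d else x) := by
  have h := pv_go_singleton c d s s.length [] (le_refl _)
  simpa [PySem.Chars.replace] using h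

lemma pv_isupper_iff (c : Char) : PySem.Chars.isupper c = true ↔ 65 ≤ c.toNat ∧ c.toNat ≤ 90 := by
  have hA : ('A').toNat = 65 := by decide
  have hZ : ('Z').toNat = 90 := by decide
  unfold PySem.Chars.isupper
  rw [Bool.and_eq_true, decide_eq_true_iff, decide_eq_true_iff, Char.le_def, Char.le_def,
      UInt32.le_iff_toNat_le, UInt32.le_iff_toNat_le]
  show ('A').toNat ≤ c.toNat ∧ c.toNat ≤ ('Z').toNat ↔ _
  rw [hA, hZ]

lemma pv_toNat_ofNat_of_lt (n : Nat) (h : n < 55296) : (Char.ofNat n).toNat = n := by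
  rw [Char.toNat_ofNat, if_pos]
  exact Or.inl h

lemma pv_not_isupper_low (ch : Char) (h : PySem.Chars.isupper ch = true) :
    ¬ PySem.Chars.isupper (Char.ofNat (ch.toNat + 32)) = true := by
  have hb := (pv_isupper_iff ch).mp h
  intro hcon
  have := (pv_isupper_iff _).mp hcon
  rw [pv_toNat_ofNat_of_lt (ch.toNat + 32) (by omega)] at this
  omega

lemma pv_foldA (rest : List Char) : ∀ acc : List Char,
    rest.foldl
      (fun cur ch =>
        if PySem.Chars.isupper ch then
          PySem.Chars.replace cur [ch] [Char.ofNat (ch.toNat + 32)]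
        else cur) acc
    = acc.map (pvF rest) := by
  induction rest with
  | nil =>
    intro acc
    simp only [List.foldl_nil]
    symm
    calc acc.map (pvF []) = acc.map id := List.map_congr_left (fun x _ => by simp [pvF])
      _ = acc := List.map_id acc
  | cons ch rest ih =>
    intro acc
    simp only [List.foldl_cons]
    by_cases hu : PySem.Chars.isupper ch = true
    · rw [if_pos hu, pv_replace_singleton, ih, List.map_map]
      apply List.map_congr_left
      intro x _
      simp only [Function.comp_apply]
      by_cases hx : x = ch
      · subst hx
        rw [if_pos rfl]
        unfold pvF
        rw [if_neg (fun hc => pv_not_isupper_low x hu hc.1),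
            if_pos ⟨hu, (by simp : x ∈ x :: rest)⟩]
      · rw [if_neg hx]
        unfold pvF
        by_cases hm : PySem.Chars.isupper x = true ∧ x ∈ rest
        · rw [if_pos hm, if_pos ⟨hm.1, List.mem_cons_of_mem _ hm.2⟩]
        · rw [if_neg hm,
              if_neg (fun hc => hm ⟨hc.1, (List.mem_cons.mp hc.2).resolve_left hx⟩)]
    · rw [if_neg hu, ih]
      apply List.map_congr_left
      intro x _
      unfold pvF
      by_cases hx : x = ch
      · subst hx
        rw [if_neg (fun hc => hu hc.1), if_neg (fun hc => hu hc.1)]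
      · by_cases hm : PySem.Chars.isupper x = true ∧ x ∈ rest
        · rw [if_pos hm, if_pos ⟨hm.1, List.mem_cons_of_mem _ hm.2⟩]
        · rw [if_neg hm,
              if_neg (fun hc => hm ⟨hc.1, (List.mem_cons.mp hc.2).resolve_left hx⟩)]

lemma pv_lineA (cs : List Char) :
    cs.foldl
      (fun cur ch =>
        if PySem.Chars.isupper ch then
          PySem.Chars.replace cur [ch] [Char.ofNat (ch.toNat + 32)]
        else cur) cs
    = cs.map pvLow := by
  rw [pv_foldA]
  apply List.map_congr_left
  intro x hx
  simp [pvF, pvLow, hx]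

lemma pv_toNat_inj {x c : Char} (h : x.toNat = c.toNat) : x = c := by
  apply Char.ext
  exact (UInt32.toNat_inj).mp h

lemma pv_getFold (us : List Char) : ∀ (d : PySem.Dict Int Int) (x : Char),
    (us.foldl (fun d c => d.insert ((c.toNat : Int)) ((c.toNat : Int) + 32)) d).get? ((x.toNat : Int))
    = if x ∈ us then some ((x.toNat : Int) + 32) else d.get? ((x.toNat : Int)) := by
  induction us with
  | nil => intro d x; simp
  | cons c us ih =>
    intro d x
    simp only [List.foldl_cons]
    rw [ih]
    by_cases hx : x = c
    · subst hx
      by_cases hm : x ∈ us <;>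
        simp [hm, PySem.Dict.get?_insert_self]
    · have hk : ((x.toNat : Int)) ≠ ((c.toNat : Int)) := by
        intro h
        exact hx (pv_toNat_inj (by exact_mod_cast h))
      by_cases hm : x ∈ us <;>
        simp [hm, hx, PySem.Dict.get?_insert_of_ne _ _ hk]

lemma pv_tableGet (cs : List Char) (x : Char) :
    (pvTable cs).get? ((x.toNat : Int))
    = if PySem.Chars.isupper x = true ∧ x ∈ cs then some ((x.toNat : Int) + 32) else none := by
  unfold pvTable
  rw [pv_getFold]
  by_cases hm : PySem.Chars.isupper x = true ∧ x ∈ cs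
  · rw [if_pos (List.mem_filter.mpr ⟨hm.2, hm.1⟩), if_pos hm]
  · rw [if_neg (fun h => hm ⟨(List.mem_filter.mp h).2, (List.mem_filter.mp h).1⟩), if_neg hm]
    simp [PySem.Dict.empty, PySem.Dict.get?]

lemma pv_lineB (cs : List Char) : pvTranslate cs (pvTable cs) = cs.map pvLow := by
  unfold pvTranslate
  apply List.map_congr_left
  intro x hx
  rw [pv_tableGet]
  by_cases hu : PySem.Chars.isupper x = true
  · rw [if_pos ⟨hu, hx⟩]
    simp only [pvLow, if_pos hu]
    congr 1
  · rw [if_neg (fun h => hu h.1)]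
    simp [pvLow, hu]

-- ===== VERDICT (by name: the statement is the Claim_ definition above) =====
theorem turn_text_in_lowercase_spec : Claim_equal_turn_text_in_lowercase := by
  intro file_list _
  unfold Spec_turn_text_in_lowercase turn_text_in_lowercase turn_text_in_lowercase_alt
  rw [PySem.List.foldl_append_singleton_eq_map
    (f := fun line : String => String.mk (line.toList.foldl
      (fun cur ch =>
        if PySem.Chars.isupper ch then
          PySem.Chars.replace cur [ch] [Char.ofNat (ch.toNat + 32)]
        else cur) line.toList))]
  simp only [List.nil_append]
  apply List.map_congr_left
  intro line _
  rw [pv_lineA, pv_lineB]
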